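-- pv_equiv track=rewrite | github.com/yuri-evangelista/CodedMasks | mask_utils/code_utils.py | is_cyclic_difference_set
-- ===== SOURCE A (Python) =====
-- def is_cyclic_difference_set(s, v, k, lambda_val):
--     """
--     Tests if a given set is a cyclic (v, k, lambda) difference set.
--
--     Args:
--         s: A list or set of integers representing the candidate set D.
--         v: The modulus (size of the cyclic group).
--         k: The expected size of the set D.
--         lambda_val: The expected number of times each non-zero residue appears as a difference.
--
--     Returns:
--         A tuple (bool, str) indicating whether the set is a difference set and a message.
--     """
--
--     # 1. Check if the set has the correct number of distinct elements modulo v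
--     unique_elements = set(x % v for x in s)
--     if len(unique_elements) != k:
--         return False, f"Error: Set does not contain exactly {k} distinct elements modulo {v}. Found {len(unique_elements)}."
--
--     # 2. Check the fundamental difference set equation: k*(k-1) = lambda*(v-1)
--     if k * (k - 1) != lambda_val * (v - 1):
--         return False, f"Error: Parameters do not satisfy k*(k-1) = lambda*(v-1). {k}*{k-1} = {k*(k-1)}, but {lambda_val}*{v-1} = {lambda_val*(v-1)}."
--
--     # 3. Compute all differences (di - dj) mod v
--     differences = {}
--     s_list = list(unique_elements) # Work with a list of unique, mod-v elements
--     n = len(s_list)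
--
--     for i in range(n):
--         for j in range(n):
--             if i != j:
--                 diff = (s_list[i] - s_list[j]) % v
--                 differences[diff] = differences.get(diff, 0) + 1
--
--     # 4. Check if each non-zero residue appears exactly lambda_val times
--     for r in range(1, v):  # Iterate through non-zero residues
--         if r not in differences or differences[r] != lambda_val:
--             return False, f"Error: Residue {r} appears {differences.get(r, 0)} times, expected {lambda_val}."
--
--     return True, f"Success: The set {s} is a cyclic ({v}, {k}, {lambda_val}) difference set."
-- ===== SOURCE B (Python) =====
-- def is_cyclic_difference_set(s, v, k, lambda_val):
--     # Per-residue membership counting: for each residue r, count elements x of D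
--     # with (x - r) % v also in D, instead of tabulating all pairwise differences.
--     D = set(x % v for x in s)
--     if len(D) != k:
--         return False, f"Error: Set does not contain exactly {k} distinct elements modulo {v}. Found {len(D)}."
--     if k * (k - 1) != lambda_val * (v - 1):
--         return False, f"Error: Parameters do not satisfy k*(k-1) = lambda*(v-1). {k}*{k-1} = {k*(k-1)}, but {lambda_val}*{v-1} = {lambda_val*(v-1)}."
--     for r in range(1, v):
--         count = sum(1 for x in D if (x - r) % v in D)
--         if count != lambda_val:
--             return False, f"Error: Residue {r} appears {count} times, expected {lambda_val}."
--     return True, f"Success: The set {s} is a cyclic ({v}, {k}, {lambda_val}) difference set."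
-- ===== Notes on version B (the rewrite author's own statement) =====
-- stated objective: alternative
-- what changed: Steps 3-4 (tabulating all ordered pairwise differences into a dict, then scanning residues) are replaced by a per-residue membership count over the set D: for each r in 1..v-1, count = sum(1 for x in D if (x-r)%v in D), returning on the first mismatch; no difference table is built.
-- intended difference: On inputs with lambda_val = 0, v >= 2 and the distinct-count and k*(k-1)=lambda*(v-1) checks passing (so the set has at most one residue), A returns (False, 'Error: Residue 1 appears 0 times, expected 0.') because its 'r not in differences' test fails absent residues even when 0 occurrences is the expected count, while B returns the success tuple; such trivial sets are genuine (v,k,0) difference sets, so B's value is the intended one. — e.g. on is_cyclic_difference_set([0], 2, 1, 0): A returns (false, "Error: Residue 1 appears 0 times, expected 0."), B returns (true, "Success: The set [0] is a cyclic (2, 1, 0) difference set.")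
import Mathlib
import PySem

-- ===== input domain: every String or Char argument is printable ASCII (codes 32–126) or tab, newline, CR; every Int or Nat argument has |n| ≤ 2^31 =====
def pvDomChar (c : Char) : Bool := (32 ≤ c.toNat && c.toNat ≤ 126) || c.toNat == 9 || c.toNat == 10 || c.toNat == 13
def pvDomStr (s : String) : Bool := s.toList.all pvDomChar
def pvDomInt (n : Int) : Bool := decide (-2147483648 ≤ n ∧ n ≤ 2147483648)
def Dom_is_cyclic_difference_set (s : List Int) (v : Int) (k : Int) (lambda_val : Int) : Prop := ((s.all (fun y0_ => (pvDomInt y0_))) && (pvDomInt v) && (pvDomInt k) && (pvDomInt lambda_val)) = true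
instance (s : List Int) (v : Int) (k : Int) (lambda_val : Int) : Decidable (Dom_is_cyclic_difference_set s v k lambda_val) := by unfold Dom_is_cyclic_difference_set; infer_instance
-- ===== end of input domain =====

-- B replaces A's pairwise-difference table (a dict built over all ordered index pairs) by a per-residue
-- membership count over the residue set; same messages, same first-failure residue (objective: alternative).

-- message helpers: literal transliterations of the f-strings shared by both programs
def pvListRepr (s : List Int) : String :=
  "[" ++ PySem.Str.join ", " (s.map PySem.Int.toStr) ++ "]"

def pvMsgDistinct (k v found : Int) : String :=
  "Error: Set does not contain exactly " ++ PySem.Int.toStr k ++ " distinct elements modulo " ++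
    PySem.Int.toStr v ++ ". Found " ++ PySem.Int.toStr found ++ "."

def pvMsgParams (k v lambda_val : Int) : String :=
  "Error: Parameters do not satisfy k*(k-1) = lambda*(v-1). " ++ PySem.Int.toStr k ++ "*" ++
    PySem.Int.toStr (k - 1) ++ " = " ++ PySem.Int.toStr (k * (k - 1)) ++ ", but " ++
    PySem.Int.toStr lambda_val ++ "*" ++ PySem.Int.toStr (v - 1) ++ " = " ++
    PySem.Int.toStr (lambda_val * (v - 1)) ++ "."

def pvMsgResidue (r count lambda_val : Int) : String :=
  "Error: Residue " ++ PySem.Int.toStr r ++ " appears " ++ PySem.Int.toStr count ++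
    " times, expected " ++ PySem.Int.toStr lambda_val ++ "."

def pvMsgSuccess (s : List Int) (v k lambda_val : Int) : String :=
  "Success: The set " ++ pvListRepr s ++ " is a cyclic (" ++ PySem.Int.toStr v ++ ", " ++
    PySem.Int.toStr k ++ ", " ++ PySem.Int.toStr lambda_val ++ ") difference set."

-- ===== PORT A =====
-- differences[diff] = differences.get(diff, 0) + 1
def pvStep (d : PySem.Dict Int Int) (x : Int) : PySem.Dict Int Int := d.insert x (d.getD x 0 + 1)

-- step 4 loop of A: first residue r with (r not in differences or differences[r] != lambda_val)
def pvLoopA (differences : PySem.Dict Int Int) (s : List Int) (v k lambda_val : Int) :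
    List Int → Bool × String
  | [] => (true, pvMsgSuccess s v k lambda_val)
  | r :: rs =>
    if ¬ differences.contains r ∨ differences.getD r 0 ≠ lambda_val then
      (false, pvMsgResidue r (differences.getD r 0) lambda_val)
    else pvLoopA differences s v k lambda_val rs

def is_cyclic_difference_set (s : List Int) (v : Int) (k : Int) (lambda_val : Int) : Bool × String :=
  let unique_elements : PySem.Set Int := PySem.Set.ofList (s.map (fun x => PySem.Int.mod x v))
  if (unique_elements.length : Int) ≠ k then
    (false, pvMsgDistinct k v (unique_elements.length : Int))
  else if k * (k - 1) ≠ lambda_val * (v - 1) then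
    (false, pvMsgParams k v lambda_val)
  else
    let s_list : List Int := unique_elements
    let n : Int := (s_list.length : Int)
    let differences : PySem.Dict Int Int :=
      (PySem.List.pyRange 0 n 1).foldl (fun d i =>
        (PySem.List.pyRange 0 n 1).foldl (fun d j =>
          if i ≠ j then
            pvStep d (PySem.Int.mod (PySem.List.pyGetD s_list i 0 - PySem.List.pyGetD s_list j 0) v)
          else d) d)
        PySem.Dict.empty
    pvLoopA differences s v k lambda_val (PySem.List.pyRange 1 v 1)

-- ===== PORT B =====
-- count = sum(1 for x in D if (x - r) % v in D)
def pvCountB (D : PySem.Set Int) (v r : Int) : Int :=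
  D.foldl (fun acc x =>
    if PySem.Set.contains D (PySem.Int.mod (x - r) v) then acc + 1 else acc) 0

def pvLoopB (D : PySem.Set Int) (s : List Int) (v k lambda_val : Int) :
    List Int → Bool × String
  | [] => (true, pvMsgSuccess s v k lambda_val)
  | r :: rs =>
    let count := pvCountB D v r
    if count ≠ lambda_val then (false, pvMsgResidue r count lambda_val)
    else pvLoopB D s v k lambda_val rs

def is_cyclic_difference_set_alt (s : List Int) (v : Int) (k : Int) (lambda_val : Int) : Bool × String :=
  let D : PySem.Set Int := PySem.Set.ofList (s.map (fun x => PySem.Int.mod x v))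
  if (D.length : Int) ≠ k then
    (false, pvMsgDistinct k v (D.length : Int))
  else if k * (k - 1) ≠ lambda_val * (v - 1) then
    (false, pvMsgParams k v lambda_val)
  else
    pvLoopB D s v k lambda_val (PySem.List.pyRange 1 v 1)

-- ===== PRECONDITION & SPEC =====
-- Pre_ excludes only v = 0 with a nonempty s, where 'x % v' raises ZeroDivisionError in both programs.
def Pre_is_cyclic_difference_set (s : List Int) (v : Int) (k : Int) (lambda_val : Int) : Prop :=
  v ≠ 0 ∨ s = []
instance (s : List Int) (v : Int) (k : Int) (lambda_val : Int) :
    Decidable (Pre_is_cyclic_difference_set s v k lambda_val) := by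
  unfold Pre_is_cyclic_difference_set; infer_instance

def pvWitness_is_cyclic_difference_set : List Int × Int × Int × Int := ([1, 2, 4], 7, 3, 1)

-- On inputs with lambda_val = 0, v ≥ 2 and both preliminary checks passing (so the set has at most one
-- residue), A returns (False, "Error: Residue 1 appears 0 times, expected 0.") because its
-- 'r not in differences' test fails absent residues even when 0 occurrences is expected, while B returns
-- the success tuple; such trivial sets are genuine (v,k,0) difference sets, so B's value is the intended one.
def D_is_cyclic_difference_set (s : List Int) (v : Int) (k : Int) (lambda_val : Int) : Prop :=
  lambda_val = 0 ∧ 2 ≤ v ∧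
    ((PySem.List.dedup (s.map (fun x => PySem.Int.mod x v))).length : Int) = k ∧
    k * (k - 1) = lambda_val * (v - 1)
instance (s : List Int) (v : Int) (k : Int) (lambda_val : Int) :
    Decidable (D_is_cyclic_difference_set s v k lambda_val) := by
  unfold D_is_cyclic_difference_set; infer_instance

def Spec_is_cyclic_difference_set (s : List Int) (v : Int) (k : Int) (lambda_val : Int)
    (out : Bool × String) : Prop :=
  ¬ D_is_cyclic_difference_set s v k lambda_val → out = is_cyclic_difference_set_alt s v k lambda_val
instance (s : List Int) (v : Int) (k : Int) (lambda_val : Int) (out : Bool × String) :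
    Decidable (Spec_is_cyclic_difference_set s v k lambda_val out) := by
  unfold Spec_is_cyclic_difference_set; infer_instance

def pvDiffWitness_is_cyclic_difference_set : List Int × Int × Int × Int := ([0], 2, 1, 0)

def pvDiffWitnessOut_is_cyclic_difference_set : (Bool × String) × (Bool × String) :=
  ((false, "Error: Residue 1 appears 0 times, expected 0."),
   (true, "Success: The set [0] is a cyclic (2, 1, 0) difference set."))

-- ===== CLAIM (what is proved, stated in full; the proofs are below) =====
def Claim_unchanged_is_cyclic_difference_set : Prop := ∀ (s : List Int) (v : Int) (k : Int) (lambda_val : Int), Dom_is_cyclic_difference_set s v k lambda_val → Pre_is_cyclic_difference_set s v k lambda_val → Spec_is_cyclic_difference_set s v k lambda_val (is_cyclic_difference_set s v k lambda_val)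
def Claim_changed_is_cyclic_difference_set : Prop := Dom_is_cyclic_difference_set (pvDiffWitness_is_cyclic_difference_set.1) (pvDiffWitness_is_cyclic_difference_set.2.1) (pvDiffWitness_is_cyclic_difference_set.2.2.1) (pvDiffWitness_is_cyclic_difference_set.2.2.2) ∧ Pre_is_cyclic_difference_set (pvDiffWitness_is_cyclic_difference_set.1) (pvDiffWitness_is_cyclic_difference_set.2.1) (pvDiffWitness_is_cyclic_difference_set.2.2.1) (pvDiffWitness_is_cyclic_difference_set.2.2.2) ∧ D_is_cyclic_difference_set (pvDiffWitness_is_cyclic_difference_set.1) (pvDiffWitness_is_cyclic_difference_set.2.1) (pvDiffWitness_is_cyclic_difference_set.2.2.1) (pvDiffWitness_is_cyclic_difference_set.2.2.2) ∧ is_cyclic_difference_set (pvDiffWitness_is_cyclic_difference_set.1) (pvDiffWitness_is_cyclic_difference_set.2.1) (pvDiffWitness_is_cyclic_difference_set.2.2.1) (pvDiffWitness_is_cyclic_difference_set.2.2.2) = pvDiffWitnessOut_is_cyclic_difference_set.1 ∧ is_cyclic_difference_set_alt (pvDiffWitness_is_cyclic_difference_set.1) (pvDiffWitness_is_cyclic_difference_set.2.1)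 (pvDiffWitness_is_cyclic_difference_set.2.2.1) (pvDiffWitness_is_cyclic_difference_set.2.2.2) = pvDiffWitnessOut_is_cyclic_difference_set.2 ∧ pvDiffWitnessOut_is_cyclic_difference_set.1 ≠ pvDiffWitnessOut_is_cyclic_difference_set.2
def Claim_exact_is_cyclic_difference_set : Prop := ∀ (s : List Int) (v : Int) (k : Int) (lambda_val : Int), Dom_is_cyclic_difference_set s v k lambda_val → Pre_is_cyclic_difference_set s v k lambda_val → D_is_cyclic_difference_set s v k lambda_val → is_cyclic_difference_set s v k lambda_val ≠ is_cyclic_difference_set_alt s v k lambda_val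

-- ===== LEMMAS AND PROOFS =====


theorem pv_sub_emod_cancel (a c v : Int) : (a - c % v) % v = (a - c) % v := by
  rw [Int.sub_emod, Int.emod_emod_of_dvd c dvd_rfl, ← Int.sub_emod]

theorem pv_key {v b r : Int} (hv : 0 < v) (hb0 : 0 ≤ b) (hbv : b < v) (hr0 : 0 ≤ r) (hrv : r < v)
    (a : Int) : PySem.Int.mod (a - b) v = r ↔ b = PySem.Int.mod (a - r) v := by
  rw [PySem.Int.mod_eq_emod_of_pos hv, PySem.Int.mod_eq_emod_of_pos hv]
  constructor
  · rintro rfl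
    rw [pv_sub_emod_cancel, show a - (a - b) = b by ring, Int.emod_eq_of_lt hb0 hbv]
  · rintro h
    rw [h, pv_sub_emod_cancel, show a - (a - r) = r by ring, Int.emod_eq_of_lt hr0 hrv]

theorem pv_mod_zero {v : Int} (hv : 0 < v) : PySem.Int.mod 0 v = 0 := by
  rw [PySem.Int.mod_eq_emod_of_pos hv]; simp

-- the per-index inner count of A, expressed over the values of l
theorem pv_cnt_i (l : List Int) (v r : Int) (hv : 0 < v) (hnd : l.Nodup)
    (hbd : ∀ b ∈ l, 0 ≤ b ∧ b < v) (hr1 : 1 ≤ r) (hrv : r < v) (i : Int) :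
    (((PySem.List.pyRange 0 (l.length : Int) 1).filter (fun j => decide (i ≠ j))).map
        (fun j => PySem.Int.mod (PySem.List.pyGetD l i 0 - PySem.List.pyGetD l j 0) v)).count r
      = if PySem.Int.mod (PySem.List.pyGetD l i 0 - r) v ∈ l then 1 else 0 := by
  rw [List.count_eq_countP, List.countP_map, List.countP_filter]
  simp only [Function.comp_def]
  have h1 : List.countP
      (fun j => (PySem.Int.mod (PySem.List.pyGetD l i 0 - PySem.List.pyGetD l j 0) v == r)
         && decide (i ≠ j)) (PySem.List.pyRange 0 (l.length : Int) 1)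
      = List.countP (fun j => PySem.Int.mod (PySem.List.pyGetD l i 0 - PySem.List.pyGetD l j 0) v == r)
          (PySem.List.pyRange 0 (l.length : Int) 1) := by
    apply List.countP_congr
    intro j _
    by_cases hij : i = j
    · subst hij
      simp [pv_mod_zero hv, show ¬ ((0:Int) = r) by omega]
    · simp [hij]
  rw [h1]
  have h2 : List.countP (fun b => PySem.Int.mod (PySem.List.pyGetD l i 0 - b) v == r) l
      = List.countP (fun b => b == PySem.Int.mod (PySem.List.pyGetD l i 0 - r) v) l := by
    apply List.countP_congr
    intro b hb
    obtain ⟨hb0, hbv⟩ := hbd b hb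
    simp only [beq_iff_eq]
    exact pv_key hv hb0 hbv (by omega) hrv _
  have h3 : List.countP (fun j => PySem.Int.mod (PySem.List.pyGetD l i 0 - PySem.List.pyGetD l j 0) v == r)
      (PySem.List.pyRange 0 (l.length : Int) 1)
      = List.countP (fun b => PySem.Int.mod (PySem.List.pyGetD l i 0 - b) v == r) l := by
    rw [← PySem.List.map_pyGetD_pyRange_zero' l 0, List.countP_map]
    simp only [Function.comp_def, PySem.List.map_pyGetD_pyRange_zero']
  rw [h3, h2, ← List.count_eq_countP]
  by_cases hm : PySem.Int.mod (PySem.List.pyGetD l i 0 - r) v ∈ l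
  · rw [List.count_eq_one_of_mem hnd hm, if_pos hm]
  · rw [List.count_eq_zero.mpr hm, if_neg hm]

-- A's guarded inner loop is the counting fold over the filtered, mapped index list
theorem pv_fold_flat (L : List Int) (i : Int) (g : Int → Int) (d : PySem.Dict Int Int) :
    L.foldl (fun d j => if i ≠ j then pvStep d (g j) else d) d
      = ((L.filter (fun j => decide (i ≠ j))).map g).foldl pvStep d := by
  rw [List.foldl_map, List.foldl_filter]
  simp

theorem pv_getD_fold (L : List Int) (d : PySem.Dict Int Int) (r : Int) :
    (L.foldl pvStep d).getD r 0 = d.getD r 0 + L.count r := by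
  simpa [pvStep] using PySem.Dict.getD_foldl_insert_add_one L d r

theorem pv_getD_nested (f : Int → Int → Int) (L2 : List Int) (r : Int) :
    ∀ (L1 : List Int) (d : PySem.Dict Int Int),
      (L1.foldl (fun d i => L2.foldl (fun d j => if i ≠ j then pvStep d (f i j) else d) d) d).getD r 0
        = d.getD r 0 + ((L1.map (fun i =>
            ((((L2.filter (fun j => decide (i ≠ j))).map (f i)).count r : Int)))).sum)
  | [], d => by simp
  | i :: L1, d => by
    rw [List.foldl_cons, pv_getD_nested f L2 r L1, pv_fold_flat, pv_getD_fold]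
    simp [add_assoc]

theorem pv_countB_eq (l : List Int) (v r : Int) :
    pvCountB l v r
      = (l.countP (fun x => PySem.Set.contains l (PySem.Int.mod (x - r) v)) : Int) := by
  unfold pvCountB
  simpa using PySem.List.foldl_if_add_one
    (fun x => PySem.Set.contains l (PySem.Int.mod (x - r) v)) l 0

-- A's difference table, looked up at a residue 1 ≤ r < v, is B's per-residue membership count
theorem pv_dict_eq (l : List Int) (v r : Int) (hv : 0 < v) (hnd : l.Nodup)
    (hbd : ∀ b ∈ l, 0 ≤ b ∧ b < v) (hr1 : 1 ≤ r) (hrv : r < v) :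
    ((PySem.List.pyRange 0 (l.length : Int) 1).foldl (fun d i =>
        (PySem.List.pyRange 0 (l.length : Int) 1).foldl (fun d j =>
          if i ≠ j then
            pvStep d (PySem.Int.mod (PySem.List.pyGetD l i 0 - PySem.List.pyGetD l j 0) v)
          else d) d)
      PySem.Dict.empty).getD r 0 = pvCountB l v r := by
  rw [pv_getD_nested (fun i j =>
    PySem.Int.mod (PySem.List.pyGetD l i 0 - PySem.List.pyGetD l j 0) v)]
  rw [PySem.Dict.getD_empty, pv_countB_eq]
  have hmap : (PySem.List.pyRange 0 (l.length : Int) 1).map (fun i =>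
        ((((PySem.List.pyRange 0 (l.length : Int) 1).filter (fun j => decide (i ≠ j))).map
          (fun j => PySem.Int.mod (PySem.List.pyGetD l i 0 - PySem.List.pyGetD l j 0) v)).count r : Int))
      = (PySem.List.pyRange 0 (l.length : Int) 1).map (fun i =>
          if PySem.Int.mod (PySem.List.pyGetD l i 0 - r) v ∈ l then (1:Int) else 0) := by
    apply List.map_congr_left
    intro i _
    rw [pv_cnt_i l v r hv hnd hbd hr1 hrv i]
    simp [apply_ite]
  rw [hmap]
  rw [show (fun i => if PySem.Int.mod (PySem.List.pyGetD l i 0 - r) v ∈ l then (1:Int) else 0)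
      = ((fun b => if PySem.Int.mod (b - r) v ∈ l then (1:Int) else 0)
          ∘ (fun j => PySem.List.pyGetD l j 0)) from rfl,
    ← List.map_map, PySem.List.map_pyGetD_pyRange_zero' l 0]
  have : (l.map (fun b => if PySem.Int.mod (b - r) v ∈ l then (1:Int) else 0)).sum
      = (l.countP (fun b => decide (PySem.Int.mod (b - r) v ∈ l)) : Int) := by
    simpa using PySem.List.sum_map_ite_one_zero
      (fun b => decide (PySem.Int.mod (b - r) v ∈ l)) l
  rw [this]
  have : l.countP (fun b => decide (PySem.Int.mod (b - r) v ∈ l))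
      = l.countP (fun x => PySem.Set.contains l (PySem.Int.mod (x - r) v)) := by
    apply List.countP_congr
    intro b _
    simp [PySem.Set.contains]
  rw [this]
  ring

-- the two residue loops agree when the table lookup equals B's count and lambda_val is nonzero
theorem pv_loops (l : List Int) (s : List Int) (v k lambda_val : Int)
    (differences : PySem.Dict Int Int)
    (hcnt : ∀ r, 1 ≤ r → r < v → differences.getD r 0 = pvCountB l v r)
    (hlam : lambda_val ≠ 0) :
    ∀ rl : List Int, (∀ r ∈ rl, 1 ≤ r ∧ r < v) →
      pvLoopA differences s v k lambda_val rl = pvLoopB l s v k lambda_val rl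
  | [], _ => rfl
  | r :: rs, hb => by
    obtain ⟨hr1, hrv⟩ := hb r (List.mem_cons_self ..)
    have hc := hcnt r hr1 hrv
    rw [pvLoopA, pvLoopB]
    have hcond : (¬ differences.contains r = true ∨ differences.getD r 0 ≠ lambda_val)
        ↔ pvCountB l v r ≠ lambda_val := by
      constructor
      · rintro (h | h)
        · rw [← hc, PySem.Dict.getD_of_not_contains differences 0 (by simpa using h)]
          omega
        · rwa [hc] at h
      · intro h
        right; rwa [hc]
    by_cases h : pvCountB l v r ≠ lambda_val
    · rw [if_pos (hcond.mpr h), if_pos h, hc]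
    · rw [if_neg (fun hh => h (hcond.mp hh)), if_neg h]
      exact pv_loops l s v k lambda_val differences hcnt hlam rs
        (fun x hx => hb x (List.mem_cons_of_mem _ hx))

theorem pv_bounds (s : List Int) (v : Int) (hv : 0 < v) :
    ∀ b ∈ PySem.Set.ofList (s.map (fun x => PySem.Int.mod x v)), 0 ≤ b ∧ b < v := by
  intro b hb
  rw [PySem.Set.mem_ofList] at hb
  obtain ⟨x, _, rfl⟩ := List.mem_map.1 hb
  exact ⟨PySem.Int.mod_nonneg x hv, PySem.Int.mod_lt x hv⟩

-- B's residue loop always succeeds on a set of at most one residue when lambda_val = 0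
theorem pv_loopB_trivial (l : List Int) (s : List Int) (v k : Int)
    (hl : l.length ≤ 1) (hbd : ∀ b ∈ l, 0 ≤ b ∧ b < v) :
    ∀ rl : List Int, (∀ r ∈ rl, 1 ≤ r ∧ r < v) →
      pvLoopB l s v k 0 rl = (true, pvMsgSuccess s v k 0)
  | [], _ => rfl
  | r :: rs, hb => by
    obtain ⟨hr1, hrv⟩ := hb r (List.mem_cons_self ..)
    have hv : 0 < v := by omega
    have hcount : pvCountB l v r = 0 := by
      match l, hl with
      | [], _ => rfl
      | [a], _ =>
        obtain ⟨ha0, hav⟩ := hbd a (List.mem_cons_self ..)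
        have hne : ¬ (PySem.Int.mod (a - r) v = a) := by
          intro h
          have := (pv_key hv ha0 hav (by omega) hrv a).mpr h.symm
          rw [sub_self, pv_mod_zero hv] at this
          omega
        simp [pvCountB, PySem.Set.contains, List.foldl, hne]
    rw [pvLoopB]
    simp only [hcount, if_neg (by omega : ¬ ((0:Int) ≠ 0))]
    exact pv_loopB_trivial l s v k hl hbd rs (fun x hx => hb x (List.mem_cons_of_mem _ hx))

theorem is_cyclic_difference_set_spec : Claim_unchanged_is_cyclic_difference_set := by
  intro s v k lambda_val hdom hpre
  unfold Spec_is_cyclic_difference_set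
  intro hnD
  simp only [is_cyclic_difference_set, is_cyclic_difference_set_alt]
  split_ifs with h1 h2
  · rfl
  · rfl
  · by_cases hv2 : 2 ≤ v
    · have hv : 0 < v := by omega
      have hlam : lambda_val ≠ 0 := by
        intro h0
        exact hnD ⟨h0, hv2, by simpa using (not_not.mp h1), not_not.mp h2⟩
      exact pv_loops _ s v k lambda_val _
        (fun r hr1 hrv => pv_dict_eq _ v r hv (PySem.Set.nodup_ofList _) (pv_bounds s v hv) hr1 hrv)
        hlam _
        (fun r hr => PySem.List.mem_pyRange_one.mp hr)
    · rw [PySem.List.pyRange_one_eq_nil (by omega : v ≤ 1)]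
      rfl

theorem is_cyclic_difference_set_tight : Claim_exact_is_cyclic_difference_set := by
  intro s v k lambda_val hdom hpre hD
  obtain ⟨hlam0, hv2, hlen, hgate⟩ := hD
  subst hlam0
  have hv : 0 < v := by omega
  have hk : k = 0 ∨ k = 1 := by
    rcases mul_eq_zero.mp (by omega : k * (k - 1) = 0) with h | h
    · exact Or.inl h
    · exact Or.inr (by omega)
  simp only [PySem.List.dedup_eq_ofList] at hlen
  have hlength : (PySem.Set.ofList (s.map (fun x => PySem.Int.mod x v))).length ≤ 1 := by omega
  simp only [is_cyclic_difference_set, is_cyclic_difference_set_alt]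
  rw [if_neg (not_not.mpr hlen), if_neg (not_not.mpr hlen),
    if_neg (not_not.mpr hgate), if_neg (not_not.mpr hgate)]
  have hB := pv_loopB_trivial (PySem.Set.ofList (s.map (fun x => PySem.Int.mod x v))) s v k
    hlength (pv_bounds s v hv) (PySem.List.pyRange 1 v 1)
    (fun r hr => PySem.List.mem_pyRange_one.mp hr)
  rw [hB]
  have hdict : ((PySem.List.pyRange 0 ((PySem.Set.ofList (s.map (fun x => PySem.Int.mod x v))).length : Int) 1).foldl
      (fun d i => (PySem.List.pyRange 0 ((PySem.Set.ofList (s.map (fun x => PySem.Int.mod x v))).length : Int) 1).foldl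
        (fun d j => if i ≠ j then pvStep d (PySem.Int.mod
          (PySem.List.pyGetD (PySem.Set.ofList (s.map (fun x => PySem.Int.mod x v))) i 0 -
           PySem.List.pyGetD (PySem.Set.ofList (s.map (fun x => PySem.Int.mod x v))) j 0) v) else d) d)
      PySem.Dict.empty) = PySem.Dict.empty := by
    match (PySem.Set.ofList (s.map (fun x => PySem.Int.mod x v))), hlength with
    | [], _ => rfl
    | [a], _ => simp [show PySem.List.pyRange 0 (1:Int) 1 = [0] by decide, List.foldl]
  rw [hdict, PySem.List.pyRange_one_cons (by omega : (1:Int) < v), pvLoopA]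
  rw [if_pos (Or.inl (by simp))]
  intro hcontra
  exact Bool.false_ne_true (congrArg Prod.fst hcontra)


-- ===== VERDICT (by name: the statement is the Claim_ definition above) =====
theorem is_cyclic_difference_set_changed : Claim_changed_is_cyclic_difference_set := by
  unfold Claim_changed_is_cyclic_difference_set; decide
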